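-- pv_equiv track=rewrite | github.com/whitestorm007/moeny2 | run.py | divideEqually
-- ===== SOURCE A (Python) =====
-- def divideEqually(items, n):
--     # Calculate the size of each group
--     group_size = len(items) // n
--
--     # Create a list to hold the groups
--     groups = []
--
--     # Iterate over the groups
--     for i in range(n):
--         # Calculate the start and end indexes for this group
--         start = i * group_size
--         end = start + group_size
--
--         # If this is the last group, include any remaining items
--         if i == n - 1:
--             end = len(items)
--
--         # Add the items for this group to the list of groups
--         groups.append(items[start:end])
--
--     return groups
-- ===== SOURCE B (Python) =====
-- def divideEqually(items, n):
--     group_size = len(items) // n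
--     it = iter(items)
--     groups = []
--     k = n
--     while k > 1:
--         groups.append([next(it) for _ in range(group_size)])
--         k -= 1
--     if n >= 1:
--         groups.append(list(it))
--     return groups
-- ===== Notes on version B (the rewrite author's own statement) =====
-- stated objective: alternative
-- what changed: B replaces A's index-arithmetic loop (start/end slices computed from i with a special last-group branch) by consuming a single iterator over items: it pulls a group_size-element prefix off the iterator n-1 times and collects the iterator's remainder as the last group, so no start/end indices, no slicing and no i==n-1 branch exist.
import Mathlib
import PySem

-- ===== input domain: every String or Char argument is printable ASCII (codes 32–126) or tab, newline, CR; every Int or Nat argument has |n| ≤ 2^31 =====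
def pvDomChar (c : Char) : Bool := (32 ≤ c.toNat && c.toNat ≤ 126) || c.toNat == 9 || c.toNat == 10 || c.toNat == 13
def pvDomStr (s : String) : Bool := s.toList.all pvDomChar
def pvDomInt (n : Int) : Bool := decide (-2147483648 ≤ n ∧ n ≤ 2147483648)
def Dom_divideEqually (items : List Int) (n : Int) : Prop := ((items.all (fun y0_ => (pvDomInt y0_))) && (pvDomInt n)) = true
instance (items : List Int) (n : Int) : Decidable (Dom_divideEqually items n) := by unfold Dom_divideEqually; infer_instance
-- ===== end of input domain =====

-- B consumes an iterator over items, peeling a group_size prefix n-1 times and collecting the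
-- remainder as the last group — no start/end index arithmetic and no last-group branch
-- (objective: alternative decomposition).
-- Pre_ excludes n = 0, where both Pythons raise ZeroDivisionError.

-- ===== PORT A =====
def divideEqually (items : List Int) (n : Int) : List (List Int) :=
  let group_size : Int := PySem.Int.floordiv (items.length : Int) n
  (PySem.List.pyRange 0 n 1).foldl (fun groups i =>
    let start := i * group_size
    let e := start + group_size
    let e := if i = n - 1 then (items.length : Int) else e
    groups ++ [PySem.List.slice items (some start) (some e)]) []

-- ===== PORT B =====
-- the while-loop of Source B: the iterator is modelled by its remaining elements 'rest';
-- '[next(it) for _ in range(group_size)]' takes g.toNat heads off rest (exact: range(g) is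
-- empty for g ≤ 0, and the loop body never exhausts the iterator, see deLoop_eq)
def deLoop (g : Int) (groups : List (List Int)) (rest : List Int) (k : Int) :
    List (List Int) × List Int :=
  if h : 1 < k then
    deLoop g (groups ++ [rest.take g.toNat]) (rest.drop g.toNat) (k - 1)
  else (groups, rest)
termination_by k.toNat
decreasing_by omega

def divideEqually_alt (items : List Int) (n : Int) : List (List Int) :=
  let group_size : Int := PySem.Int.floordiv (items.length : Int) n
  let p := deLoop group_size [] items n
  if 1 ≤ n then p.1 ++ [p.2] else p.1

-- ===== PRECONDITION & SPEC =====
-- Pre_ excludes exactly n = 0, on which Python's '//' raises ZeroDivisionError in A (and in B).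
def Pre_divideEqually (items : List Int) (n : Int) : Prop := n ≠ 0
instance (items : List Int) (n : Int) : Decidable (Pre_divideEqually items n) := by unfold Pre_divideEqually; infer_instance
def pvWitness_divideEqually : List Int × Int := ([1, 2, 3, 4, 5], 2)
def Spec_divideEqually (items : List Int) (n : Int) (out : List (List Int)) : Prop := out = divideEqually_alt items n
instance (items : List Int) (n : Int) (out : List (List Int)) : Decidable (Spec_divideEqually items n out) := by unfold Spec_divideEqually; infer_instance

-- ===== CLAIM (what is proved, stated in full; the proofs are below) =====
def Claim_equal_divideEqually : Prop := ∀ (items : List Int) (n : Int), Dom_divideEqually items n → Pre_divideEqually items n → Spec_divideEqually items n (divideEqually items n)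

-- ===== LEMMAS AND PROOFS =====

-- closed form of B's consuming loop, for a natural group size
theorem deLoop_eq (g : Nat) (k : Int) (groups : List (List Int)) (rest : List Int) :
    deLoop (g : Int) groups rest k =
      (groups ++ (List.range (k - 1).toNat).map (fun j => (rest.drop (j * g)).take g),
       rest.drop ((k - 1).toNat * g)) := by
  by_cases h : 1 < k
  · have hm : (k - 1).toNat = (k - 2).toNat + 1 := by omega
    rw [deLoop, dif_pos h, deLoop_eq g (k - 1)]
    simp only [Int.toNat_natCast, show k - 1 - 1 = k - 2 from by ring, hm,
      List.range_succ_eq_map, List.map_cons, List.map_map, Prod.mk.injEq]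
    refine ⟨?_, ?_⟩
    · simp only [Nat.zero_mul, List.drop_zero, List.append_assoc, List.singleton_append]
      congr 1
      congr 1
      apply List.map_congr_left
      intro j _
      simp only [Function.comp_apply, Nat.succ_eq_add_one, List.drop_drop]
      congr 2
      ring
    · rw [List.drop_drop]
      congr 1
      ring
  · rw [deLoop, dif_neg h]
    have : (k - 1).toNat = 0 := by omega
    simp [this]
termination_by k.toNat
decreasing_by omega

theorem ports_eq (items : List Int) (n : Int) :
    divideEqually items n = divideEqually_alt items n := by
  simp only [divideEqually, divideEqually_alt]
  by_cases hpos : 1 ≤ n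
  · -- n ≥ 1 : both are n-1 prefix groups plus the remainder
    have hg0 : 0 ≤ PySem.Int.floordiv (items.length : Int) n := by
      simp only [PySem.Int.floordiv]
      exact Int.fdiv_nonneg (Int.natCast_nonneg _) (by omega)
    obtain ⟨g, hg⟩ : ∃ g : Nat, (g : Int) = PySem.Int.floordiv (items.length : Int) n :=
      ⟨_, Int.toNat_of_nonneg hg0⟩
    rw [← hg, if_pos hpos, deLoop_eq]
    -- A side: split the range at n-1
    have hsplit : PySem.List.pyRange 0 n 1 = PySem.List.pyRange 0 (n - 1) 1 ++ [n - 1] := by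
      have := PySem.List.pyRange_one_succ_right (a := 0) (b := n - 1) (by omega)
      simpa [show n - 1 + 1 = n from by ring] using this
    rw [PySem.List.foldl_append_singleton_eq_map, List.nil_append, hsplit, List.map_append,
        PySem.List.pyRange_one, List.map_map]
    dsimp only
    simp only [sub_zero, List.nil_append]
    congr 1
    · -- the first n-1 groups
      apply List.map_congr_left
      intro j hj
      rw [List.mem_range] at hj
      have hjn : (j : Int) ≠ n - 1 := by omega
      have h1 : (j : Int) * (g : Int) = ((j * g : Nat) : Int) := by push_cast; ring
      have h2 : (j : Int) * (g : Int) + (g : Int) = ((j * g + g : Nat) : Int) := by push_cast; ring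
      simp only [Function.comp_apply, zero_add, if_neg hjn]
      rw [h2, h1, PySem.List.slice_natCast]
      congr 1
      omega
    · -- the last group: items[(n-1)*g : len] = drop ((n-1).toNat * g)
      simp only [List.map_cons, List.map_nil, if_true]
      have h1 : (n - 1) * (g : Int) = (((n - 1).toNat * g : Nat) : Int) := by
        push_cast [Int.toNat_of_nonneg (show (0:Int) ≤ n - 1 by omega)]; ring
      rw [h1, show ((items.length : Int)) = ((items.length : Nat) : Int) from rfl,
          PySem.List.slice_natCast]
      congr 1
      exact List.take_of_length_le (by simp)
  · -- n < 0 : A's range is empty, B's loop never runs and the guard is false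
    rw [PySem.List.pyRange_one_eq_nil (by omega), deLoop, dif_neg (by omega), if_neg hpos]
    rfl

-- ===== VERDICT (by name: the statement is the Claim_ definition above) =====
theorem divideEqually_spec : Claim_equal_divideEqually := by
  intro items n _ _
  unfold Spec_divideEqually
  exact ports_eq items n
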